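-- pv_equiv track=rewrite | github.com/abicknell2/engine-gpx | Engine/utils/result_gens_helpers.py | build_feeder_downstreams
-- ===== SOURCE A (Python) =====
-- def build_feeder_downstreams(feedersfeedlocs: dict, proc_loc: dict) -> dict:
--     """
--     For each feeder line id (key from feedersfeedlocs), recursively follow its feeder until
--     a main process is reached, collecting downstream feeder ids.
--     Returns a dict mapping each feeder line id to a list of its downstream feeder ids.
--     """
--     downstream = {}
--     for fl in feedersfeedlocs.keys():
--         ds = []
--         cur = fl
--         # Loop until the process location for the current feeder indicates it is main.
--         while True:
--             # Look up the process id from feedersfeedlocs: this is the 'to' field.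
--             pid = feedersfeedlocs[cur]
--             # Get the ProcessLocation tuple from proc_loc.
--             loc = proc_loc.get(pid, (True, None))
--             if loc[0]:
--                 break
--             cur = loc[1]  # the feeder id from the tuple
--             ds.append(cur)
--         downstream[fl] = ds
--     return downstream
-- ===== SOURCE B (Python) =====
-- def build_feeder_downstreams(feedersfeedlocs: dict, proc_loc: dict) -> dict:
--     """Alternative, memoized implementation.
--
--     downstream(f) = [g] + downstream(g) where g is f's feeder, so we walk each
--     chain only until we hit an already-memoized feeder (or a main process) and
--     fill in the suffixes back-to-front.
--     """
--     memo = {}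
--     for f in feedersfeedlocs:
--         path = []
--         cur = f
--         while cur not in memo:
--             pid = feedersfeedlocs[cur]
--             flag, nxt = proc_loc.get(pid, (True, None))
--             if flag:
--                 memo[cur] = []
--                 break
--             path.append(cur)
--             cur = nxt
--         succ = cur
--         for g in reversed(path):
--             memo[g] = [succ] + memo[succ]
--             succ = g
--     return {f: memo[f] for f in feedersfeedlocs}
-- ===== Notes on version B (the rewrite author's own statement) =====
-- stated objective: alternative
-- what changed: B memoizes each feeder's downstream suffix (downstream[f] = [g] + downstream[g]), walking each chain only until an already-computed feeder and filling suffixes back-to-front, instead of A's independent full chain walk per feeder.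
import Mathlib
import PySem

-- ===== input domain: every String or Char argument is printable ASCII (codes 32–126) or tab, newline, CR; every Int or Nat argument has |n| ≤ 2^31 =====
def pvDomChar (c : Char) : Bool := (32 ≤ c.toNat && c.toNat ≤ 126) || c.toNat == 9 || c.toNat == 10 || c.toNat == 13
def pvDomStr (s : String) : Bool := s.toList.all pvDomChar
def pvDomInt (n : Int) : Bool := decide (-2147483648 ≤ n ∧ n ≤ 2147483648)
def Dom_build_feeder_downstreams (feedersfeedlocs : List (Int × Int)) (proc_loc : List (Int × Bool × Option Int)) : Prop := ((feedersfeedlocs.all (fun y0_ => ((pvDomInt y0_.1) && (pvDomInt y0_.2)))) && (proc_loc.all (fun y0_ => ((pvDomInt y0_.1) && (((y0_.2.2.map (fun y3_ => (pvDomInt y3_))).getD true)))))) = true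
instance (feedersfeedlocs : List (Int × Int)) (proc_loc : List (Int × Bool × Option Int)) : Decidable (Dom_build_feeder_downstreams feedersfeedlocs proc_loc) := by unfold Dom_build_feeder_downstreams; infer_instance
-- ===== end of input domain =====

-- B is an alternative algorithm: it memoizes each feeder's downstream suffix
-- (downstream[f] = [g] + downstream[g]), walking a chain only until an already-computed
-- feeder and filling suffixes back-to-front, instead of A's independent full walk per feeder.

-- ===== PORT A =====
-- A's `while True` loop, transliterated with fuel proc_loc.length + 1; any terminating chain
-- visits pairwise-distinct process ids, so this fuel is never exhausted on inputs in Pre_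
-- (on fuel exhaustion — a cycle, where Python diverges — it returns the accumulator as junk).
def aLoop (ffd : PySem.Dict Int Int) (pld : PySem.Dict Int (Bool × Option Int)) :
    Nat → Int → List Int → List Int
  | 0, _, ds => ds
  | fuel + 1, cur, ds =>
    match ffd.get? cur with
    | none => ds          -- Python: KeyError (excluded by Pre_)
    | some pid =>
      match (pld.get? pid).getD (true, none) with
      | (flag, nxt) =>
        if flag then ds   -- break
        else
          match nxt with
          | none => ds    -- Python appends None (no Int value exists; excluded by Pre_)
          | some g => aLoop ffd pld fuel g (ds ++ [g])

def build_feeder_downstreams (feedersfeedlocs : List (Int × Int)) (proc_loc : List (Int × Bool × Option Int)) : List (Int × List Int) :=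
  let ffd := PySem.Dict.ofList feedersfeedlocs
  let pld := PySem.Dict.ofList proc_loc
  (ffd.keys.foldl
    (fun downstream fl => downstream.insert fl (aLoop ffd pld (proc_loc.length + 1) fl []))
    PySem.Dict.empty).items

-- ===== PORT B =====
-- walk the chain from `cur` until an already-memoized feeder or a main process; returns
-- (memo, path of feeders visited, final cur).  Same fuel convention as aLoop.
def bWalk (ffd : PySem.Dict Int Int) (pld : PySem.Dict Int (Bool × Option Int)) :
    Nat → PySem.Dict Int (List Int) → List Int → Int →
    PySem.Dict Int (List Int) × List Int × Int
  | 0, memo, path, cur => (memo, path, cur)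
  | fuel + 1, memo, path, cur =>
    if memo.contains cur then (memo, path, cur)
    else
      match ffd.get? cur with
      | none => (memo, path, cur)      -- KeyError (excluded by Pre_)
      | some pid =>
        match (pld.get? pid).getD (true, none) with
        | (flag, nxt) =>
          if flag then (memo.insert cur [], path, cur)
          else
            match nxt with
            | none => (memo, path, cur)  -- excluded by Pre_
            | some g => bWalk ffd pld fuel memo (path ++ [cur]) g

-- `for g in reversed(path): memo[g] = [succ] + memo[succ]; succ = g`
def bUnwind : PySem.Dict Int (List Int) → List Int → Int → PySem.Dict Int (List Int)
  | memo, [], _ => memo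
  | memo, g :: rest, succ => bUnwind (memo.insert g ([succ] ++ memo.getD succ [])) rest g

def build_feeder_downstreams_alt (feedersfeedlocs : List (Int × Int)) (proc_loc : List (Int × Bool × Option Int)) : List (Int × List Int) :=
  let ffd := PySem.Dict.ofList feedersfeedlocs
  let pld := PySem.Dict.ofList proc_loc
  let memo := ffd.keys.foldl
    (fun memo f =>
      let r := bWalk ffd pld (proc_loc.length + 1) memo [] f
      bUnwind r.1 r.2.1.reverse r.2.2)
    PySem.Dict.empty
  -- {f: memo[f] for f in feedersfeedlocs}  (memo[f] is present for every key under Pre_)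
  (ffd.keys.foldl (fun d f => d.insert f (memo.getD f [])) PySem.Dict.empty).items

-- ===== PRECONDITION & SPEC =====
-- chainOk: the chain from `cur` reaches a main (or absent) process location without a missing
-- feeder key and without a None feeder id, within `fuel` steps.  Whether A returns is a
-- reachability property of the feeder successor graph, which has no bounds/shape formulation;
-- chainOk iterates only the successor relation and computes none of the ports' outputs.
def chainOk (ffd : PySem.Dict Int Int) (pld : PySem.Dict Int (Bool × Option Int)) :
    Nat → Int → Bool
  | 0, _ => false
  | fuel + 1, cur =>
    match ffd.get? cur with
    | none => false
    | some pid =>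
      match (pld.get? pid).getD (true, none) with
      | (flag, nxt) =>
        if flag then true
        else
          match nxt with
          | none => false
          | some g => chainOk ffd pld fuel g

-- Pre_ holds exactly when Python A returns: every feeder chain terminates cleanly (no KeyError,
-- no None feeder id, no cycle).  A terminating chain has pairwise-distinct process ids, hence
-- length ≤ proc_loc.length, so the fuel bound proc_loc.length + 1 excludes nothing terminating.
def Pre_build_feeder_downstreams (feedersfeedlocs : List (Int × Int)) (proc_loc : List (Int × Bool × Option Int)) : Prop :=
  ∀ f ∈ (PySem.Dict.ofList feedersfeedlocs).keys,
    chainOk (PySem.Dict.ofList feedersfeedlocs) (PySem.Dict.ofList proc_loc)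
      (proc_loc.length + 1) f = true
instance (feedersfeedlocs : List (Int × Int)) (proc_loc : List (Int × Bool × Option Int)) : Decidable (Pre_build_feeder_downstreams feedersfeedlocs proc_loc) := by unfold Pre_build_feeder_downstreams; infer_instance

def pvWitness_build_feeder_downstreams : (List (Int × Int)) × (List (Int × Bool × Option Int)) :=
  ([(1, 10), (2, 20)], [(10, (false, some 2)), (20, (true, none))])

def Spec_build_feeder_downstreams (feedersfeedlocs : List (Int × Int)) (proc_loc : List (Int × Bool × Option Int)) (out : List (Int × List Int)) : Prop := out = build_feeder_downstreams_alt feedersfeedlocs proc_loc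
instance (feedersfeedlocs : List (Int × Int)) (proc_loc : List (Int × Bool × Option Int)) (out : List (Int × List Int)) : Decidable (Spec_build_feeder_downstreams feedersfeedlocs proc_loc out) := by unfold Spec_build_feeder_downstreams; infer_instance

-- ===== CLAIM (what is proved, stated in full; the proofs are below) =====
def Claim_equal_build_feeder_downstreams : Prop := ∀ (feedersfeedlocs : List (Int × Int)) (proc_loc : List (Int × Bool × Option Int)), Dom_build_feeder_downstreams feedersfeedlocs proc_loc → Pre_build_feeder_downstreams feedersfeedlocs proc_loc → Spec_build_feeder_downstreams feedersfeedlocs proc_loc (build_feeder_downstreams feedersfeedlocs proc_loc)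

-- ===== LEMMAS AND PROOFS =====

-- the successor feeder of `cur`, if its process location says "not main"
def stepNext (ffd : PySem.Dict Int Int) (pld : PySem.Dict Int (Bool × Option Int)) (cur : Int) : Option Int :=
  match ffd.get? cur with
  | none => none
  | some pid =>
    match (pld.get? pid).getD (true, none) with
    | (flag, nxt) => if flag then none else nxt

theorem chainOk_mono (ffd : PySem.Dict Int Int) (pld : PySem.Dict Int (Bool × Option Int)) :
    ∀ (m n : Nat) (c : Int), chainOk ffd pld m c = true → m ≤ n → chainOk ffd pld n c = true := by
  intro m
  induction m with
  | zero => intro n c h _; simp [chainOk] at h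
  | succ m ih =>
    intro n c h hle
    obtain ⟨n, rfl⟩ : ∃ n', n = n' + 1 := ⟨n - 1, by omega⟩
    cases h1 : ffd.get? c with
    | none => simp [chainOk, h1] at h
    | some pid =>
      cases h2 : (pld.get? pid).getD (true, none) with
      | mk flag nxt =>
        cases flag with
        | true => simp [chainOk, h1, h2]
        | false =>
          cases nxt with
          | none => simp [chainOk, h1, h2] at h
          | some g =>
            simp only [chainOk, h1, h2, Bool.false_eq_true, if_false] at h ⊢
            exact ih n g h (by omega)

theorem aLoop_acc (ffd : PySem.Dict Int Int) (pld : PySem.Dict Int (Bool × Option Int)) :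
    ∀ (n : Nat) (c : Int) (ds : List Int),
      aLoop ffd pld n c ds = ds ++ aLoop ffd pld n c [] := by
  intro n
  induction n with
  | zero => intro c ds; simp [aLoop]
  | succ n ih =>
    intro c ds
    cases h1 : ffd.get? c with
    | none => simp [aLoop, h1]
    | some pid =>
      cases h2 : (pld.get? pid).getD (true, none) with
      | mk flag nxt =>
        cases flag with
        | true => simp [aLoop, h1, h2]
        | false =>
          cases nxt with
          | none => simp [aLoop, h1, h2]
          | some g =>
            simp only [aLoop, h1, h2, Bool.false_eq_true, if_false, List.nil_append]
            rw [ih g (ds ++ [g]), ih g [g]]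
            simp

theorem aLoop_fuel (ffd : PySem.Dict Int Int) (pld : PySem.Dict Int (Bool × Option Int)) :
    ∀ (m n : Nat) (c : Int), chainOk ffd pld m c = true → m ≤ n →
      aLoop ffd pld n c [] = aLoop ffd pld m c [] := by
  intro m
  induction m with
  | zero => intro n c h _; simp [chainOk] at h
  | succ m ih =>
    intro n c h hle
    obtain ⟨n, rfl⟩ : ∃ n', n = n' + 1 := ⟨n - 1, by omega⟩
    cases h1 : ffd.get? c with
    | none => simp [aLoop, h1]
    | some pid =>
      cases h2 : (pld.get? pid).getD (true, none) with
      | mk flag nxt =>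
        cases flag with
        | true => simp [aLoop, h1, h2]
        | false =>
          cases nxt with
          | none => simp [chainOk, h1, h2] at h
          | some g =>
            simp only [chainOk, h1, h2, Bool.false_eq_true, if_false] at h
            simp only [aLoop, h1, h2, Bool.false_eq_true, if_false, List.nil_append]
            rw [aLoop_acc ffd pld n g [g], aLoop_acc ffd pld m g [g],
              ih n g h (by omega)]

theorem aLoop_step (ffd : PySem.Dict Int Int) (pld : PySem.Dict Int (Bool × Option Int))
    (M : Nat) (g s : Int) (hg : chainOk ffd pld M g = true)
    (hs : stepNext ffd pld g = some s) :
    aLoop ffd pld M g [] = s :: aLoop ffd pld M s [] := by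
  obtain ⟨m, rfl⟩ : ∃ m, M = m + 1 := by
    cases M with
    | zero => simp [chainOk] at hg
    | succ m => exact ⟨m, rfl⟩
  cases h1 : ffd.get? g with
  | none => simp [stepNext, h1] at hs
  | some pid =>
    cases h2 : (pld.get? pid).getD (true, none) with
    | mk flag nxt =>
      cases flag with
      | true => simp [stepNext, h1, h2] at hs
      | false =>
        cases nxt with
        | none => simp [stepNext, h1, h2] at hs
        | some g2 =>
          obtain rfl : g2 = s := by simpa [stepNext, h1, h2] using hs
          have hg' : chainOk ffd pld m g2 = true := by
            simpa [chainOk, h1, h2] using hg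
          have e1 : aLoop ffd pld (m + 1) g [] = aLoop ffd pld m g2 [g2] := by
            simp [aLoop, h1, h2]
          rw [e1, aLoop_acc ffd pld m g2 [g2],
            aLoop_fuel ffd pld m (m + 1) g2 hg' (by omega)]
          rfl

-- the memo invariant: every memoized feeder holds its full downstream chain
def MemoInv (ffd : PySem.Dict Int Int) (pld : PySem.Dict Int (Bool × Option Int)) (M : Nat)
    (memo : PySem.Dict Int (List Int)) : Prop :=
  ∀ k, memo.contains k = true → memo.getD k [] = aLoop ffd pld M k []

theorem unwind_ok (ffd : PySem.Dict Int Int) (pld : PySem.Dict Int (Bool × Option Int)) (M : Nat) :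
    ∀ (rp : List Int) (succ : Int) (memo : PySem.Dict Int (List Int)),
      MemoInv ffd pld M memo → memo.contains succ = true →
      List.IsChain (fun a b => stepNext ffd pld b = some a) (succ :: rp) →
      (∀ x ∈ succ :: rp, chainOk ffd pld M x = true) →
      MemoInv ffd pld M (bUnwind memo rp succ)
      ∧ (∀ k, memo.contains k = true → (bUnwind memo rp succ).contains k = true)
      ∧ (∀ x ∈ succ :: rp, (bUnwind memo rp succ).contains x = true) := by
  intro rp
  induction rp with
  | nil =>
    intro succ memo hInv hsucc _ _
    refine ⟨hInv, fun k h => h, ?_⟩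
    intro x hx
    rcases List.mem_cons.mp hx with rfl | hx
    · exact hsucc
    · exact absurd hx (by simp)
  | cons g rest ih =>
    intro succ memo hInv hsucc hchain hok
    have hR : stepNext ffd pld g = some succ := (List.isChain_cons_cons.mp hchain).1
    have hgok : chainOk ffd pld M g = true := hok g (by simp)
    have hval : [succ] ++ memo.getD succ [] = aLoop ffd pld M g [] := by
      rw [hInv succ hsucc, aLoop_step ffd pld M g succ hgok hR]; rfl
    have hInv' : MemoInv ffd pld M (memo.insert g ([succ] ++ memo.getD succ [])) := by
      intro k hk
      rw [PySem.Dict.getD_insert]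
      by_cases hkg : k = g
      · subst hkg; simp [hval]
      · rw [if_neg hkg]
        rw [PySem.Dict.contains_insert] at hk
        rcases Bool.or_eq_true_iff.mp hk with h | h
        · exact absurd (by simpa using h) hkg
        · exact hInv k h
    simp only [bUnwind]
    have hchain' : List.IsChain (fun a b => stepNext ffd pld b = some a) (g :: rest) :=
      (List.isChain_cons_cons.mp hchain).2
    have hok' : ∀ x ∈ g :: rest, chainOk ffd pld M x = true := fun x hx =>
      hok x (List.mem_cons_of_mem _ hx)
    have hg' : (memo.insert g ([succ] ++ memo.getD succ [])).contains g = true :=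
      PySem.Dict.contains_insert_self _ _ _
    obtain ⟨i1, i2, i3⟩ := ih g (memo.insert g ([succ] ++ memo.getD succ [])) hInv' hg' hchain' hok'
    refine ⟨i1, ?_, ?_⟩
    · intro k hk
      apply i2
      rw [PySem.Dict.contains_insert]; simp [hk]
    · intro x hx
      rcases List.mem_cons.mp hx with rfl | hx
      · exact i2 _ (by rw [PySem.Dict.contains_insert]; simp [hsucc])
      · exact i3 x hx

theorem walk_ok (ffd : PySem.Dict Int Int) (pld : PySem.Dict Int (Bool × Option Int)) (M : Nat) :
    ∀ (fuel : Nat) (cur : Int) (memo : PySem.Dict Int (List Int)) (path : List Int),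
      fuel ≤ M →
      chainOk ffd pld fuel cur = true →
      MemoInv ffd pld M memo →
      List.IsChain (fun a b => stepNext ffd pld b = some a) (cur :: path.reverse) →
      (∀ x ∈ path, chainOk ffd pld M x = true) →
      MemoInv ffd pld M (bUnwind (bWalk ffd pld fuel memo path cur).1
          (bWalk ffd pld fuel memo path cur).2.1.reverse (bWalk ffd pld fuel memo path cur).2.2)
      ∧ (∀ k, memo.contains k = true →
          (bUnwind (bWalk ffd pld fuel memo path cur).1
            (bWalk ffd pld fuel memo path cur).2.1.reverse (bWalk ffd pld fuel memo path cur).2.2).contains k = true)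
      ∧ (∀ x ∈ cur :: path,
          (bUnwind (bWalk ffd pld fuel memo path cur).1
            (bWalk ffd pld fuel memo path cur).2.1.reverse (bWalk ffd pld fuel memo path cur).2.2).contains x = true) := by
  intro fuel
  induction fuel with
  | zero => intro cur memo path _ hOk; simp [chainOk] at hOk
  | succ fuel ih =>
    intro cur memo path hle hOk hInv hchain hokpath
    have hcurM : chainOk ffd pld M cur = true := chainOk_mono ffd pld (fuel + 1) M cur hOk hle
    have hokrev : ∀ x ∈ cur :: path.reverse, chainOk ffd pld M x = true := by
      intro x hx
      rcases List.mem_cons.mp hx with rfl | hx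
      · exact hcurM
      · exact hokpath x (List.mem_reverse.mp hx)
    by_cases hmem : memo.contains cur = true
    · simp only [bWalk, if_pos hmem]
      obtain ⟨i1, i2, i3⟩ := unwind_ok ffd pld M path.reverse cur memo hInv hmem hchain hokrev
      refine ⟨i1, i2, ?_⟩
      intro x hx
      rcases List.mem_cons.mp hx with rfl | hx
      · exact i3 _ (by simp)
      · exact i3 x (List.mem_cons_of_mem _ (List.mem_reverse.mpr hx))
    · cases h1 : ffd.get? cur with
      | none => simp [chainOk, h1] at hOk
      | some pid =>
        cases h2 : (pld.get? pid).getD (true, none) with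
        | mk flag nxt =>
          cases flag with
          | true =>
            have hstep : bWalk ffd pld (fuel + 1) memo path cur = (memo.insert cur [], path, cur) := by
              simp [bWalk, hmem, h1, h2]
            rw [hstep]
            have hval : aLoop ffd pld M cur [] = [] := by
              obtain ⟨m, hm⟩ : ∃ m, M = m + 1 := ⟨M - 1, by omega⟩
              rw [hm]; simp [aLoop, h1, h2]
            have hInv' : MemoInv ffd pld M (memo.insert cur []) := by
              intro k hk
              rw [PySem.Dict.getD_insert]
              by_cases hkc : k = cur
              · subst hkc; simp [hval]
              · rw [if_neg hkc]
                rw [PySem.Dict.contains_insert] at hk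
                rcases Bool.or_eq_true_iff.mp hk with h | h
                · exact absurd (by simpa using h) hkc
                · exact hInv k h
            have hc : (memo.insert cur []).contains cur = true :=
              PySem.Dict.contains_insert_self _ _ _
            obtain ⟨i1, i2, i3⟩ := unwind_ok ffd pld M path.reverse cur (memo.insert cur [])
              hInv' hc hchain hokrev
            refine ⟨i1, ?_, ?_⟩
            · intro k hk
              apply i2
              rw [PySem.Dict.contains_insert]; simp [hk]
            · intro x hx
              rcases List.mem_cons.mp hx with rfl | hx
              · exact i3 _ (by simp)
              · exact i3 x (List.mem_cons_of_mem _ (List.mem_reverse.mpr hx))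
          | false =>
            cases nxt with
            | none => simp [chainOk, h1, h2] at hOk
            | some g =>
              have hOk' : chainOk ffd pld fuel g = true := by
                simpa [chainOk, h1, h2] using hOk
              have hstep : bWalk ffd pld (fuel + 1) memo path cur
                  = bWalk ffd pld fuel memo (path ++ [cur]) g := by
                simp [bWalk, hmem, h1, h2]
              rw [hstep]
              have hstepN : stepNext ffd pld cur = some g := by
                simp [stepNext, h1, h2]
              have hchain0 : List.IsChain (fun a b => stepNext ffd pld b = some a)
                  (g :: cur :: path.reverse) := List.isChain_cons_cons.mpr ⟨hstepN, hchain⟩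
              have hchain' : List.IsChain (fun a b => stepNext ffd pld b = some a)
                  (g :: (path ++ [cur]).reverse) := by
                rw [List.reverse_append]
                simpa using hchain0
              have hok' : ∀ x ∈ path ++ [cur], chainOk ffd pld M x = true := by
                intro x hx
                rcases List.mem_append.mp hx with hx | hx
                · exact hokpath x hx
                · obtain rfl : x = cur := by simpa using hx
                  exact hcurM
              obtain ⟨i1, i2, i3⟩ := ih g memo (path ++ [cur]) (by omega) hOk' hInv hchain' hok'
              refine ⟨i1, i2, ?_⟩
              intro x hx
              apply i3
              rcases List.mem_cons.mp hx with rfl | hx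
              · simp
              · exact List.mem_cons_of_mem _ (List.mem_append_left _ hx)

theorem fold_ok (ffd : PySem.Dict Int Int) (pld : PySem.Dict Int (Bool × Option Int)) (M : Nat) :
    ∀ (ks : List Int) (memo : PySem.Dict Int (List Int)),
      MemoInv ffd pld M memo →
      (∀ f ∈ ks, chainOk ffd pld M f = true) →
      MemoInv ffd pld M (ks.foldl
        (fun memo f =>
          let r := bWalk ffd pld M memo [] f
          bUnwind r.1 r.2.1.reverse r.2.2) memo)
      ∧ (∀ k, memo.contains k = true → (ks.foldl
          (fun memo f =>
            let r := bWalk ffd pld M memo [] f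
            bUnwind r.1 r.2.1.reverse r.2.2) memo).contains k = true)
      ∧ (∀ f ∈ ks, (ks.foldl
          (fun memo f =>
            let r := bWalk ffd pld M memo [] f
            bUnwind r.1 r.2.1.reverse r.2.2) memo).contains f = true) := by
  intro ks
  induction ks with
  | nil => intro memo hInv _; exact ⟨hInv, fun k h => h, by simp⟩
  | cons f ks ih =>
    intro memo hInv hok
    simp only [List.foldl_cons]
    have hfok : chainOk ffd pld M f = true := hok f (by simp)
    obtain ⟨w1, w2, w3⟩ := walk_ok ffd pld M M f memo [] (le_refl M) hfok hInv
      (by simp) (by simp)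
    obtain ⟨i1, i2, i3⟩ := ih _ w1 (fun x hx => hok x (by simp [hx]))
    refine ⟨i1, ?_, ?_⟩
    · intro k hk
      exact i2 k (w2 k hk)
    · intro x hx
      rcases List.mem_cons.mp hx with rfl | hx
      · exact i2 x (w3 x (by simp))
      · exact i3 x hx

-- ===== VERDICT (by name: the statement is the Claim_ definition above) =====
theorem build_feeder_downstreams_spec : Claim_equal_build_feeder_downstreams := by
  intro ff pl _hDom hPre
  unfold Spec_build_feeder_downstreams build_feeder_downstreams build_feeder_downstreams_alt
  dsimp only
  obtain ⟨hI, _, hC⟩ := fold_ok (PySem.Dict.ofList ff) (PySem.Dict.ofList pl) (pl.length + 1)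
    (PySem.Dict.ofList ff).keys PySem.Dict.empty
    (by intro k hk; simp [PySem.Dict.contains_empty] at hk) hPre
  apply congrArg PySem.Dict.items
  apply PySem.List.foldl_congr_mem
  intro acc x hx
  congr 1
  exact (hI x (hC x hx)).symm
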